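-- pv_equiv track=rewrite | github.com/LBNL-HEP-QIS/ZeroNoiseExtrapolation | RIIM_tools/RIIM_tools.py | place_permutation
-- ===== SOURCE A (Python) =====
-- def place_permutation(ref_str, perm):
--     result = []
--     count = 0
--     for s in ref_str:
--         if s == '1':
--             result.append(perm[count])
--             count += 1
--         else:
--             result.append(0)
--     return result
-- ===== SOURCE B (Python) =====
-- def place_permutation(ref_str, perm):
--     parts = ref_str.split('1')
--     out = [0] * len(parts[0])
--     for i, part in enumerate(parts[1:]):
--         out.append(perm[i])
--         out.extend([0] * len(part))
--     return out
-- ===== Notes on version B (the rewrite author's own statement) =====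
-- stated objective: alternative
-- what changed: B splits ref_str on '1' and rebuilds the answer as zero-runs (one per split piece) interleaved with successive perm values, replacing A's per-character scan with a running counter.
import Mathlib
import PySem

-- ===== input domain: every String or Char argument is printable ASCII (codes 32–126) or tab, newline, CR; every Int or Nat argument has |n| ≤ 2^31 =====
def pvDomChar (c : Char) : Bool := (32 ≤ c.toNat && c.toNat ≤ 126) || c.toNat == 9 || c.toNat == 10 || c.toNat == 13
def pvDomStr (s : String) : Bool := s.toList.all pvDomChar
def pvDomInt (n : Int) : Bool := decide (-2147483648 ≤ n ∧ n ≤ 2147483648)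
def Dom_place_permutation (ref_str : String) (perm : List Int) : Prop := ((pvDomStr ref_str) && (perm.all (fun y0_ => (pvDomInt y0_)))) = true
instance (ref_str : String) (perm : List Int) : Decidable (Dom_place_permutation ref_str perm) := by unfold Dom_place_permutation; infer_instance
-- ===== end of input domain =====

-- B splits ref_str on '1' and rebuilds the answer as zero-runs interleaved with successive
-- perm values, replacing A's per-character scan with a running counter; alternative decomposition.

-- ===== PORT A =====
-- fused loop: append perm[count] at '1', else 0, counting '1's as we go
def place_permutation (ref_str : String) (perm : List Int) : List Int :=
  (ref_str.toList.foldl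
    (fun (acc : List Int × Int) s =>
      if s = '1' then (acc.1 ++ [PySem.List.pyGetD perm acc.2 0], acc.2 + 1)
      else (acc.1 ++ [(0 : Int)], acc.2))
    ([], 0)).1

-- ===== PORT B =====
-- parts = ref_str.split('1'); out = [0]*len(parts[0]);
-- for i, part in enumerate(parts[1:]): out.append(perm[i]); out.extend([0]*len(part))
def place_permutation_alt (ref_str : String) (perm : List Int) : List Int :=
  let parts := PySem.Chars.splitOn ref_str.toList ['1']
  let out := List.replicate (PySem.List.pyGetD parts 0 []).length (0 : Int)
  (PySem.List.enumerate (PySem.List.slice parts (some 1) none) 0).foldl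
    (fun out p => out ++ ([PySem.List.pyGetD perm p.1 0] ++ List.replicate p.2.length (0 : Int)))
    out

-- ===== PRECONDITION & SPEC =====
-- Pre_ excludes exactly the inputs where A raises IndexError: fewer perm entries than '1's in ref_str.
def Pre_place_permutation (ref_str : String) (perm : List Int) : Prop :=
  ref_str.toList.count '1' ≤ perm.length
instance (ref_str : String) (perm : List Int) : Decidable (Pre_place_permutation ref_str perm) := by
  unfold Pre_place_permutation; infer_instance
def pvWitness_place_permutation : String × List Int := ("101x", [4, 7])

def Spec_place_permutation (ref_str : String) (perm : List Int) (out : List Int) : Prop := out = place_permutation_alt ref_str perm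
instance (ref_str : String) (perm : List Int) (out : List Int) : Decidable (Spec_place_permutation ref_str perm out) := by unfold Spec_place_permutation; infer_instance

-- ===== CLAIM (what is proved, stated in full; the proofs are below) =====
def Claim_equal_place_permutation : Prop := ∀ (ref_str : String) (perm : List Int), Dom_place_permutation ref_str perm → Pre_place_permutation ref_str perm → Spec_place_permutation ref_str perm (place_permutation ref_str perm)

-- ===== LEMMAS AND PROOFS =====

-- reference function both ports are reduced to: element-by-element, consuming perm from the front
def pvG : List Char → List Int → List Int
  | [], _ => []
  | s :: r, perm =>
    if s = '1' then PySem.List.pyGetD perm 0 0 :: pvG r (perm.drop 1)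
    else (0 : Int) :: pvG r perm

-- ---- A-side: the fold with a counter equals pvG ----
lemma pv_a_eq_g (l : List Char) (perm : List Int) :
    ∀ (acc : List Int) (c : Nat),
    (l.foldl
      (fun (acc : List Int × Int) s =>
        if s = '1' then (acc.1 ++ [PySem.List.pyGetD perm acc.2 0], acc.2 + 1)
        else (acc.1 ++ [(0 : Int)], acc.2)) (acc, (c : Int))).1
      = acc ++ pvG l (perm.drop c) := by
  induction l generalizing perm with
  | nil => intro acc c; simp [pvG]
  | cons s r ih =>
      intro acc c
      by_cases h1 : s = '1'
      · simp only [List.foldl_cons]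
        rw [if_pos h1]
        rw [show ((c : Int) + 1) = (((c + 1 : Nat)) : Int) by omega]
        rw [ih perm _ (c + 1)]
        have hd : perm.drop (c + 1) = (perm.drop c).drop 1 := by
          rw [List.drop_drop]
        have hg : PySem.List.pyGetD perm (c : Int) 0 = PySem.List.pyGetD (perm.drop c) 0 0 := by
          rw [show (0 : Int) = ((0 : Nat) : Int) from rfl,
              PySem.List.pyGetD_natCast, PySem.List.pyGetD_natCast]
          simp [List.getD_eq_getElem?_getD, List.getElem?_drop]
        rw [show pvG (s :: r) (perm.drop c)
              = PySem.List.pyGetD (perm.drop c) 0 0 :: pvG r ((perm.drop c).drop 1) from by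
            rw [pvG, if_pos h1]]
        rw [← hd, ← hg, List.append_assoc]
        rfl
      · simp only [List.foldl_cons]
        rw [if_neg h1]
        rw [ih perm _ c]
        simp [pvG, h1]

-- ---- B-side: characterise splitOn on the single-char separator '1' ----
def pvMapHead {α : Type} (f : List α → List α) : List (List α) → List (List α)
  | [] => []
  | p :: ps => f p :: ps

def pvSp1 : List Char → List (List Char)
  | [] => [[]]
  | c :: r => if c = '1' then [] :: pvSp1 r else pvMapHead (c :: ·) (pvSp1 r)

lemma pv_sp1_ne_nil (l : List Char) : pvSp1 l ≠ [] := by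
  induction l with
  | nil => simp [pvSp1]
  | cons c r ih =>
      by_cases hc : c = '1'
      · simp [pvSp1, hc]
      · cases h : pvSp1 r with
        | nil => exact absurd h ih
        | cons p ps => simp [pvSp1, hc, h, pvMapHead]

lemma pv_go_spec : ∀ (fuel : Nat) (l cur : List Char) (acc : List (List Char)),
    l.length ≤ fuel →
    PySem.Chars.splitOn.go ['1'] fuel l cur acc
      = acc.reverse ++ pvMapHead (cur.reverse ++ ·) (pvSp1 l) := by
  intro fuel
  induction fuel with
  | zero =>
      intro l cur acc h
      have : l = [] := List.eq_nil_of_length_eq_zero (by omega)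
      subst this
      simp [PySem.Chars.splitOn.go, pvSp1, pvMapHead]
  | succ n ih =>
      intro l cur acc h
      cases l with
      | nil => simp [PySem.Chars.splitOn.go, pvSp1, pvMapHead]
      | cons c rest =>
          by_cases hc : c = '1'
          · subst hc
            rw [PySem.Chars.splitOn.go]
            simp only [List.isPrefixOf, BEq.rfl, Bool.true_and, if_pos]
            rw [ih _ _ _ (by simpa using Nat.le_of_succ_le_succ h)]
            cases hsp : pvSp1 rest with
            | nil => exact absurd hsp (pv_sp1_ne_nil rest)
            | cons p ps => simp [pvSp1, pvMapHead, hsp]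
          · rw [PySem.Chars.splitOn.go]
            have hpre : List.isPrefixOf ['1'] (c :: rest) = false := by
              simp [List.isPrefixOf]
              intro hh; exact absurd hh.symm hc
            rw [hpre]
            simp only [Bool.false_eq_true, if_false]
            rw [ih _ _ _ (by simpa using Nat.le_of_succ_le_succ h)]
            cases hsp : pvSp1 rest with
            | nil => exact absurd hsp (pv_sp1_ne_nil rest)
            | cons p ps => simp [pvSp1, hc, pvMapHead, hsp]

lemma pv_splitOn_eq_sp1 (l : List Char) : PySem.Chars.splitOn l ['1'] = pvSp1 l := by
  unfold PySem.Chars.splitOn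
  rw [pv_go_spec _ _ _ _ (by omega)]
  cases h : pvSp1 l with
  | nil => exact absurd h (pv_sp1_ne_nil l)
  | cons p ps => simp [pvMapHead]

-- the block B emits for the i-th piece after the first
def pvFlat (perm : List Int) (qs : List (Int × List Char)) : List Int :=
  qs.flatMap (fun q => PySem.List.pyGetD perm q.1 0 :: List.replicate q.2.length (0 : Int))

lemma pv_enumerate_shift {α : Type} (l : List α) (s : Int) :
    PySem.List.enumerate l (s + 1) = (PySem.List.enumerate l s).map (fun p => (p.1 + 1, p.2)) := by
  induction l generalizing s with
  | nil => simp [PySem.List.enumerate_nil]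
  | cons x xs ih =>
      simp only [PySem.List.enumerate_cons, List.map_cons]
      rw [show s + 1 + 1 = (s + 1) + 1 by ring, ih]

lemma pv_flat_shift (perm : List Int) (qs : List (Int × List Char))
    (h : ∀ q ∈ qs, 0 ≤ q.1) :
    (qs.map (fun q => (q.1 + 1, q.2))).flatMap
        (fun q => PySem.List.pyGetD perm q.1 0 :: List.replicate q.2.length (0 : Int))
      = qs.flatMap
        (fun q => PySem.List.pyGetD (perm.drop 1) q.1 0 :: List.replicate q.2.length (0 : Int)) := by
  induction qs with
  | nil => simp
  | cons q rest ih =>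
      have hq : 0 ≤ q.1 := h q (List.mem_cons_self)
      obtain ⟨n, hn⟩ : ∃ n : Nat, q.1 = (n : Int) := ⟨q.1.toNat, by omega⟩
      simp only [List.map_cons, List.flatMap_cons]
      rw [ih (fun p hp => h p (List.mem_cons_of_mem _ hp))]
      have hg : PySem.List.pyGetD perm (q.1 + 1) 0 = PySem.List.pyGetD (perm.drop 1) q.1 0 := by
        rw [hn, show ((n : Int) + 1) = (((n + 1 : Nat)) : Int) by omega,
            PySem.List.pyGetD_natCast, PySem.List.pyGetD_natCast]
        cases perm <;> simp [List.getD]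
      rw [hg]

lemma pv_enumerate_fst_nonneg {α : Type} (xs : List α) (q : Int × α)
    (hq : q ∈ PySem.List.enumerate xs 0) : 0 ≤ q.1 := by
  rcases (PySem.List.mem_enumerate_iff _ _ _).mp hq with ⟨k, hk, rfl⟩
  simp

-- main B-side lemma: the zero-run/flatMap form of B over pvSp1 equals pvG
lemma pv_b_eq_g (l : List Char) : ∀ (perm : List Int),
    List.replicate ((pvSp1 l).headD []).length (0 : Int)
        ++ pvFlat perm (PySem.List.enumerate ((pvSp1 l).drop 1) 0)
      = pvG l perm := by
  induction l with
  | nil => intro perm; simp [pvSp1, pvFlat, PySem.List.enumerate_nil, pvG]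
  | cons c r ih =>
      intro perm
      by_cases hc : c = '1'
      · cases hsp : pvSp1 r with
        | nil => exact absurd hsp (pv_sp1_ne_nil r)
        | cons p ps =>
            rw [show pvSp1 (c :: r) = [] :: p :: ps from by rw [pvSp1, if_pos hc, hsp]]
            simp only [List.headD, List.length_nil, List.replicate_zero, List.nil_append,
              List.drop_one, List.tail_cons]
            rw [PySem.List.enumerate_cons]
            rw [show (0 : Int) + 1 = 0 + 1 from rfl, pv_enumerate_shift]
            simp only [pvFlat, List.flatMap_cons]
            rw [pv_flat_shift perm _ (fun q hq => pv_enumerate_fst_nonneg ps q hq)]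
            rw [pvG, if_pos hc, ← ih (perm.drop 1)]
            rw [hsp]
            simp [pvFlat]
      · cases hsp : pvSp1 r with
        | nil => exact absurd hsp (pv_sp1_ne_nil r)
        | cons p ps =>
            rw [show pvSp1 (c :: r) = (c :: p) :: ps from by
              rw [pvSp1, if_neg hc, hsp]; rfl]
            rw [pvG, if_neg hc, ← ih perm, hsp]
            simp [List.replicate_succ]

-- ===== VERDICT (by name: the statement is the Claim_ definition above) =====
theorem place_permutation_spec : Claim_equal_place_permutation := by
  intro ref_str perm _ _
  unfold Spec_place_permutation place_permutation place_permutation_alt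
  have hA := pv_a_eq_g ref_str.toList perm [] 0
  simp only [Nat.cast_zero, List.drop_zero, List.nil_append] at hA
  rw [hA]
  rw [pv_splitOn_eq_sp1]
  rw [PySem.List.foldl_append_eq_flatMap]
  rw [show PySem.List.slice (pvSp1 ref_str.toList) (some 1) none
        = (pvSp1 ref_str.toList).drop 1 from by
    rw [show (1 : Int) = ((1 : Nat) : Int) from rfl, PySem.List.slice_from_natCast]]
  rw [show PySem.List.pyGetD (pvSp1 ref_str.toList) 0 ([] : List Char)
        = (pvSp1 ref_str.toList).headD [] from by
    rw [show (0 : Int) = ((0 : Nat) : Int) from rfl, PySem.List.pyGetD_natCast]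
    cases pvSp1 ref_str.toList <;> simp [List.getD]]
  exact (pv_b_eq_g ref_str.toList perm).symm
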